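-- pv_equiv track=rewrite | github.com/csyager/wordle-bot | bot.py | get_char_frequency_by_position
-- ===== SOURCE A (Python) =====
-- def get_char_frequency_by_position(word_list):
-- 	counts = {
-- 		0: {},
-- 		1: {},
-- 		2: {},
-- 		3: {},
-- 		4: {}
-- 	}
-- 	for word in word_list:
-- 		for i in range(5):
-- 			c = word[i]
-- 			if c in counts[i]:
-- 				counts[i][c] += 1
-- 			else:
-- 				counts[i][c] = 1
-- 	return counts
-- ===== SOURCE B (Python) =====
-- def get_char_frequency_by_position(word_list):
--     # Per position: materialize the column, then set each first-seen char's
--     # count directly via list.count (no incremental counter updates).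
--     res = {}
--     for i in range(5):
--         col = [word[i] for word in word_list]
--         d = {}
--         for c in col:
--             if c not in d:
--                 d[c] = col.count(c)
--         res[i] = d
--     return res
-- ===== Notes on version B (the rewrite author's own statement) =====
-- stated objective: alternative
-- what changed: B replaces A's single word-major pass that increments nested counters with a per-position two-stage scheme: materialize the column as a list, then assign each first-seen character its final count directly via list.count; no running counts are maintained.
import Mathlib
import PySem

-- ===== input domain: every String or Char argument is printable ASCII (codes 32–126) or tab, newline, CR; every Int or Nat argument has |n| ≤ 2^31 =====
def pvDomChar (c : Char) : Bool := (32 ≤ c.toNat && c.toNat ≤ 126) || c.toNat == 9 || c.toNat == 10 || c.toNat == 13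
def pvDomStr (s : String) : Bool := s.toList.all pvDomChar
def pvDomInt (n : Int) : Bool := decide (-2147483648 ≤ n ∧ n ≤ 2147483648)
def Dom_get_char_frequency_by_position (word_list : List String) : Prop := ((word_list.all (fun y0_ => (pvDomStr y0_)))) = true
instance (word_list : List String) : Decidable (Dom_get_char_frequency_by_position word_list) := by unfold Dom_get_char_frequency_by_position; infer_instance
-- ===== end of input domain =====

-- B replaces A's word-major incremental counting by per-position column lists whose
-- dicts are filled with final counts via list.count (objective: alternative).


-- ===== PORT A =====
-- word[i] as a 1-char string; the .getD "" default is never reached inside Pre_ (Python raises IndexError there)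
def pvCharAt (word : String) (i : Int) : String :=
  ((PySem.Str.pyGet? word i).map (fun c => String.ofList [c])).getD ""

-- body of A's inner 'for i in range(5)' loop, named so the proofs can cite it
def pvInnerA (word : String) (counts : PySem.Dict Int (PySem.Dict String Int)) (i : Int) :
    PySem.Dict Int (PySem.Dict String Int) :=
  let c := pvCharAt word i
  let di := counts.getD i PySem.Dict.empty
  if di.contains c then
    counts.insert i (di.insert c (di.getD c 0 + 1))
  else
    counts.insert i (di.insert c 1)

-- one iteration of A's 'for word in word_list' loop
def pvWordStep (counts : PySem.Dict Int (PySem.Dict String Int)) (word : String) :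
    PySem.Dict Int (PySem.Dict String Int) :=
  (PySem.List.pyRange 0 5 1).foldl (pvInnerA word) counts

def get_char_frequency_by_position (word_list : List String) : List (Int × List (String × Int)) :=
  let counts : PySem.Dict Int (PySem.Dict String Int) :=
    PySem.Dict.ofList [(0, PySem.Dict.empty), (1, PySem.Dict.empty), (2, PySem.Dict.empty),
                       (3, PySem.Dict.empty), (4, PySem.Dict.empty)]
  (word_list.foldl pvWordStep counts).items.map (fun p => (p.1, p.2.items))

-- ===== PORT B =====
-- B's dict for position i: scan the materialized column, a first-seen char gets its
-- FINAL count at once via list.count; chars already present are skipped.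
def pvColDict (word_list : List String) (i : Int) : PySem.Dict String Int :=
  let col := word_list.map (fun w => pvCharAt w i)
  col.foldl (fun d c => if d.contains c then d else d.insert c ((col.count c : Int)))
    PySem.Dict.empty

def get_char_frequency_by_position_alt (word_list : List String) : List (Int × List (String × Int)) :=
  let res := (PySem.List.pyRange 0 5 1).foldl (fun res i =>
    res.insert i (pvColDict word_list i))
    (PySem.Dict.empty : PySem.Dict Int (PySem.Dict String Int))
  res.items.map (fun p => (p.1, p.2.items))

-- ===== PRECONDITION & SPEC =====
-- Pre_ excludes word lists containing a word shorter than 5 characters: there A raises IndexError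
-- (word[i] out of range), returning no value.
def Pre_get_char_frequency_by_position (word_list : List String) : Prop :=
  ∀ w ∈ word_list, 5 ≤ w.toList.length
instance (word_list : List String) : Decidable (Pre_get_char_frequency_by_position word_list) := by unfold Pre_get_char_frequency_by_position; infer_instance

def pvWitness_get_char_frequency_by_position : List String := ["crane", "slate"]

def Spec_get_char_frequency_by_position (word_list : List String) (out : List (Int × List (String × Int))) : Prop := out = get_char_frequency_by_position_alt word_list
instance (word_list : List String) (out : List (Int × List (String × Int))) : Decidable (Spec_get_char_frequency_by_position word_list out) := by unfold Spec_get_char_frequency_by_position; infer_instance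

-- ===== CLAIM =====
def Claim_equal_get_char_frequency_by_position : Prop := ∀ (word_list : List String), Dom_get_char_frequency_by_position word_list → Pre_get_char_frequency_by_position word_list → Spec_get_char_frequency_by_position word_list (get_char_frequency_by_position word_list)

-- ===== LEMMAS AND PROOFS =====

-- A's increment on a single position's dict, as a named operation
def pvInc (d : PySem.Dict String Int) (c : String) : PySem.Dict String Int :=
  d.insert c (d.getD c 0 + 1)

-- A's membership-tested update is exactly pvInc
theorem pvIf_eq_pvInc (d : PySem.Dict String Int) (c : String)
    (k : PySem.Dict String Int → PySem.Dict Int (PySem.Dict String Int)) :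
    (if d.contains c then k (d.insert c (d.getD c 0 + 1)) else k (d.insert c 1))
      = k (pvInc d c) := by
  cases h : d.contains c with
  | true => simp [pvInc]
  | false => simp [pvInc, PySem.Dict.getD_of_not_contains d 0 h]

theorem pvStepAt0 (w : String) (d0 d1 d2 d3 d4 : PySem.Dict String Int) :
    pvInnerA w (PySem.Dict.mk [(0, d0), (1, d1), (2, d2), (3, d3), (4, d4)]) 0
    = PySem.Dict.mk [(0, pvInc d0 (pvCharAt w 0)), (1, d1), (2, d2), (3, d3), (4, d4)] := by
  show (if d0.contains (pvCharAt w 0) then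
          (PySem.Dict.mk [(0, d0), (1, d1), (2, d2), (3, d3), (4, d4)]).insert 0
            (d0.insert (pvCharAt w 0) (d0.getD (pvCharAt w 0) 0 + 1))
        else
          (PySem.Dict.mk [(0, d0), (1, d1), (2, d2), (3, d3), (4, d4)]).insert 0
            (d0.insert (pvCharAt w 0) 1)) = _
  exact pvIf_eq_pvInc d0 (pvCharAt w 0) _

theorem pvStepAt1 (w : String) (d0 d1 d2 d3 d4 : PySem.Dict String Int) :
    pvInnerA w (PySem.Dict.mk [(0, d0), (1, d1), (2, d2), (3, d3), (4, d4)]) 1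
    = PySem.Dict.mk [(0, d0), (1, pvInc d1 (pvCharAt w 1)), (2, d2), (3, d3), (4, d4)] := by
  show (if d1.contains (pvCharAt w 1) then
          (PySem.Dict.mk [(0, d0), (1, d1), (2, d2), (3, d3), (4, d4)]).insert 1
            (d1.insert (pvCharAt w 1) (d1.getD (pvCharAt w 1) 0 + 1))
        else
          (PySem.Dict.mk [(0, d0), (1, d1), (2, d2), (3, d3), (4, d4)]).insert 1
            (d1.insert (pvCharAt w 1) 1)) = _
  exact pvIf_eq_pvInc d1 (pvCharAt w 1) _

theorem pvStepAt2 (w : String) (d0 d1 d2 d3 d4 : PySem.Dict String Int) :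
    pvInnerA w (PySem.Dict.mk [(0, d0), (1, d1), (2, d2), (3, d3), (4, d4)]) 2
    = PySem.Dict.mk [(0, d0), (1, d1), (2, pvInc d2 (pvCharAt w 2)), (3, d3), (4, d4)] := by
  show (if d2.contains (pvCharAt w 2) then
          (PySem.Dict.mk [(0, d0), (1, d1), (2, d2), (3, d3), (4, d4)]).insert 2
            (d2.insert (pvCharAt w 2) (d2.getD (pvCharAt w 2) 0 + 1))
        else
          (PySem.Dict.mk [(0, d0), (1, d1), (2, d2), (3, d3), (4, d4)]).insert 2
            (d2.insert (pvCharAt w 2) 1)) = _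
  exact pvIf_eq_pvInc d2 (pvCharAt w 2) _

theorem pvStepAt3 (w : String) (d0 d1 d2 d3 d4 : PySem.Dict String Int) :
    pvInnerA w (PySem.Dict.mk [(0, d0), (1, d1), (2, d2), (3, d3), (4, d4)]) 3
    = PySem.Dict.mk [(0, d0), (1, d1), (2, d2), (3, pvInc d3 (pvCharAt w 3)), (4, d4)] := by
  show (if d3.contains (pvCharAt w 3) then
          (PySem.Dict.mk [(0, d0), (1, d1), (2, d2), (3, d3), (4, d4)]).insert 3
            (d3.insert (pvCharAt w 3) (d3.getD (pvCharAt w 3) 0 + 1))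
        else
          (PySem.Dict.mk [(0, d0), (1, d1), (2, d2), (3, d3), (4, d4)]).insert 3
            (d3.insert (pvCharAt w 3) 1)) = _
  exact pvIf_eq_pvInc d3 (pvCharAt w 3) _

theorem pvStepAt4 (w : String) (d0 d1 d2 d3 d4 : PySem.Dict String Int) :
    pvInnerA w (PySem.Dict.mk [(0, d0), (1, d1), (2, d2), (3, d3), (4, d4)]) 4
    = PySem.Dict.mk [(0, d0), (1, d1), (2, d2), (3, d3), (4, pvInc d4 (pvCharAt w 4))] := by
  show (if d4.contains (pvCharAt w 4) then
          (PySem.Dict.mk [(0, d0), (1, d1), (2, d2), (3, d3), (4, d4)]).insert 4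
            (d4.insert (pvCharAt w 4) (d4.getD (pvCharAt w 4) 0 + 1))
        else
          (PySem.Dict.mk [(0, d0), (1, d1), (2, d2), (3, d3), (4, d4)]).insert 4
            (d4.insert (pvCharAt w 4) 1)) = _
  exact pvIf_eq_pvInc d4 (pvCharAt w 4) _

-- one word of A's outer loop acts componentwise on the 5-key dict
theorem pvStepA (w : String) (d0 d1 d2 d3 d4 : PySem.Dict String Int) :
    pvWordStep (PySem.Dict.mk [(0, d0), (1, d1), (2, d2), (3, d3), (4, d4)]) w
    = PySem.Dict.mk [(0, pvInc d0 (pvCharAt w 0)), (1, pvInc d1 (pvCharAt w 1)),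
                     (2, pvInc d2 (pvCharAt w 2)), (3, pvInc d3 (pvCharAt w 3)),
                     (4, pvInc d4 (pvCharAt w 4))] := by
  have hr : PySem.List.pyRange 0 5 1 = [0, 1, 2, 3, 4] := by decide
  unfold pvWordStep
  rw [hr]
  simp only [List.foldl]
  rw [pvStepAt0, pvStepAt1, pvStepAt2, pvStepAt3, pvStepAt4]

-- the whole of A's loop equals five independent column folds
theorem pvLoopA (ws : List String) (d0 d1 d2 d3 d4 : PySem.Dict String Int) :
    ws.foldl pvWordStep (PySem.Dict.mk [(0, d0), (1, d1), (2, d2), (3, d3), (4, d4)])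
    = PySem.Dict.mk
        [(0, ws.foldl (fun d w => pvInc d (pvCharAt w 0)) d0),
         (1, ws.foldl (fun d w => pvInc d (pvCharAt w 1)) d1),
         (2, ws.foldl (fun d w => pvInc d (pvCharAt w 2)) d2),
         (3, ws.foldl (fun d w => pvInc d (pvCharAt w 3)) d3),
         (4, ws.foldl (fun d w => pvInc d (pvCharAt w 4)) d4)] := by
  induction ws generalizing d0 d1 d2 d3 d4 with
  | nil => rfl
  | cons w ws ih =>
    simp only [List.foldl_cons]
    rw [pvStepA, ih]

-- A's column fold is collections-style counting: counter of the column
theorem pvColA (ws : List String) (i : Int) :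
    ws.foldl (fun d w => pvInc d (pvCharAt w i)) PySem.Dict.empty
    = PySem.Dict.counter (ws.map (fun w => pvCharAt w i)) := by
  rw [← PySem.Dict.foldl_insert_getD_add_one_eq_counter, List.foldl_map]
  simp only [pvInc]

-- B's skip-or-set-final-count fold, characterised: it appends, in first-occurrence
-- order, the new keys with their full-column counts
theorem pvBFoldItems (col : List String) (ys : List String) (d : PySem.Dict String Int) :
    (ys.foldl (fun d c => if d.contains c then d else d.insert c ((col.count c : Int))) d).items
    = d.items ++ ((PySem.Set.ofList ys).filter (fun c => !d.contains c)).map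
        (fun c => (c, (col.count c : Int))) := by
  induction ys generalizing d with
  | nil => simp [PySem.Set.ofList_nil]
  | cons c ys ih =>
    simp only [List.foldl_cons]
    cases h : d.contains c with
    | true =>
      rw [ih, PySem.Set.ofList_cons]
      have hdis : (PySem.Set.discard (PySem.Set.ofList ys) c).filter (fun y => !d.contains y)
          = (PySem.Set.ofList ys).filter (fun y => !d.contains y) := by
        simp only [PySem.Set.discard, List.filter_filter]
        apply List.filter_congr
        intro x hx
        cases hxc : x == c with
        | true =>
          have : x = c := by simpa using hxc
          subst this
          simp [h]
        | false => simp
      simp [h, hdis]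
    | false =>
      simp only [Bool.false_eq_true, if_false]
      rw [ih, PySem.Dict.items_insert_of_not_contains _ _ h, PySem.Set.ofList_cons]
      have hcont : ∀ y, (d.insert c ((col.count c : Int))).contains y
          = (y == c || d.contains y) := fun y => PySem.Dict.contains_insert d c y _
      have hfil : ((PySem.Set.discard (PySem.Set.ofList ys) c)).filter (fun y => !d.contains y)
          = (PySem.Set.ofList ys).filter (fun y => !(d.insert c ((col.count c : Int))).contains y) := by
        simp only [PySem.Set.discard, List.filter_filter]
        apply List.filter_congr
        intro x _
        rw [hcont x]
        cases hxc : x == c with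
        | true => simp
        | false => simp
      simp [h, hfil, List.append_assoc]

-- hence B's column dict has exactly counter's items
theorem pvColDict_items (ws : List String) (i : Int) :
    (pvColDict ws i).items
    = (PySem.Set.ofList (ws.map (fun w => pvCharAt w i))).map
        (fun c => (c, ((ws.map (fun w => pvCharAt w i)).count c : Int))) := by
  unfold pvColDict
  rw [pvBFoldItems]
  simp [PySem.Dict.empty]

-- B's column dict IS the counter of the column
theorem pvColDict_eq_counter (ws : List String) (i : Int) :
    pvColDict ws i = PySem.Dict.counter (ws.map (fun w => pvCharAt w i)) := by
  apply PySem.Dict.ext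
  rw [pvColDict_items, PySem.Dict.items_counter]

-- ===== VERDICT (by name: the statement is the Claim_ definition above) =====
theorem get_char_frequency_by_position_spec : Claim_equal_get_char_frequency_by_position := by
  intro word_list _ _
  unfold Spec_get_char_frequency_by_position
  show (word_list.foldl pvWordStep (PySem.Dict.ofList [(0, PySem.Dict.empty), (1, PySem.Dict.empty),
      (2, PySem.Dict.empty), (3, PySem.Dict.empty), (4, PySem.Dict.empty)])).items.map
        (fun p => (p.1, p.2.items))
    = get_char_frequency_by_position_alt word_list
  have hinit : (PySem.Dict.ofList [(0, PySem.Dict.empty), (1, PySem.Dict.empty), (2, PySem.Dict.empty),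
      (3, PySem.Dict.empty), (4, PySem.Dict.empty)] : PySem.Dict Int (PySem.Dict String Int))
      = PySem.Dict.mk [(0, PySem.Dict.empty), (1, PySem.Dict.empty), (2, PySem.Dict.empty),
      (3, PySem.Dict.empty), (4, PySem.Dict.empty)] := rfl
  rw [hinit, pvLoopA]
  have hr : PySem.List.pyRange 0 5 1 = [0, 1, 2, 3, 4] := by decide
  show _ = (((PySem.List.pyRange 0 5 1).foldl (fun res i =>
      res.insert i (pvColDict word_list i))
      (PySem.Dict.empty : PySem.Dict Int (PySem.Dict String Int))).items.map
        (fun p => (p.1, p.2.items)))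
  rw [hr]
  simp only [List.foldl]
  have hB : (((((PySem.Dict.empty : PySem.Dict Int (PySem.Dict String Int)).insert 0
        (pvColDict word_list 0)).insert 1 (pvColDict word_list 1)).insert 2
        (pvColDict word_list 2)).insert 3 (pvColDict word_list 3)).insert 4 (pvColDict word_list 4)
      = PySem.Dict.mk [(0, pvColDict word_list 0), (1, pvColDict word_list 1),
          (2, pvColDict word_list 2), (3, pvColDict word_list 3), (4, pvColDict word_list 4)] := rfl
  rw [hB]
  simp only [pvColDict_eq_counter, pvColA]
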